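-- pv_equiv track=rewrite | github.com/EloyTejero/Algo1-IP | p10integradora/ejs.py | obtener_sufijos
-- ===== SOURCE A (Python) =====
-- def obtener_sufijos(palabra:str) -> list[str]:
--     sufijos:list[str] = []
--     for i in range(len(palabra)):
--         sufijo:str = ""
--         for j in range(i,len(palabra)):
--             sufijo += palabra[j]
--         sufijos.append(sufijo)
--     return sufijos
-- ===== SOURCE B (Python) =====
-- def obtener_sufijos(palabra: str) -> list[str]:
--     acc = ""
--     res = []
--     for ch in reversed(palabra):
--         acc = ch + acc
--         res.append(acc)
--     res.reverse()
--     return res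
-- ===== Notes on version B (the rewrite author's own statement) =====
-- stated objective: faster
-- what changed: Instead of rebuilding each suffix character-by-character in a nested loop, B makes one right-to-left pass maintaining a single growing accumulator string, appending it each step and reversing the collected list at the end, so the inner per-character loop disappears.
import Mathlib
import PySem

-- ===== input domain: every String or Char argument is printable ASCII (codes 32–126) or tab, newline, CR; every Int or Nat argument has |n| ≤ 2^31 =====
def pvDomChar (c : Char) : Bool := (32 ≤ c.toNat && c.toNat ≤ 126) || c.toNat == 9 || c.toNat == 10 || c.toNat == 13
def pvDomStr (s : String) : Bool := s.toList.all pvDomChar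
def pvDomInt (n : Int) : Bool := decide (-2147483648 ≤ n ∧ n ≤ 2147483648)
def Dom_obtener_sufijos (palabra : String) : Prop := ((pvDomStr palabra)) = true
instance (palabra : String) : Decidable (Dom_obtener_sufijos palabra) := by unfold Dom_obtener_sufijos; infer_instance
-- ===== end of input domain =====

-- B builds every suffix in one right-to-left pass with a single growing accumulator
-- (alternative decomposition; no asymptotic change measured).


-- ===== PORT A =====
-- for i in range(len(palabra)): build sufijo char by char over j in range(i, len), append.
-- range(i, len) is ported as List.range' i (n - i); palabra[j] as cs.getD j ' ' — exact here
-- because every produced index satisfies j < cs.length.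
def obtener_sufijos (palabra : String) : List String :=
  let cs := palabra.toList
  let n := cs.length
  (List.range n).foldl
    (fun sufijos i =>
      sufijos ++ [String.mk ((List.range' i (n - i)).foldl (fun sufijo j => sufijo ++ [cs.getD j ' ']) [])])
    []

-- ===== PORT B =====
-- one pass over reversed(palabra): acc = ch + acc, res.append(acc); finally res.reverse().
def obtener_sufijos_alt (palabra : String) : List String :=
  let p := palabra.toList.reverse.foldl
    (fun (s : List Char × List (List Char)) ch => (ch :: s.1, s.2 ++ [ch :: s.1])) ([], [])
  (p.2.reverse).map String.mk

-- ===== PRECONDITION & SPEC =====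
def Spec_obtener_sufijos (palabra : String) (out : List String) : Prop := out = obtener_sufijos_alt palabra
instance (palabra : String) (out : List String) : Decidable (Spec_obtener_sufijos palabra out) := by unfold Spec_obtener_sufijos; infer_instance

-- ===== CLAIM (what is proved, stated in full; the proofs are below) =====
def Claim_equal_obtener_sufijos : Prop := ∀ (palabra : String), Dom_obtener_sufijos palabra → Spec_obtener_sufijos palabra (obtener_sufijos palabra)

-- ===== LEMMAS AND PROOFS =====

-- appending singletons in a foldl is just map
lemma pv_foldl_app {α β : Type} (f : α → β) :
    ∀ (l : List α) (acc : List β),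
      l.foldl (fun s j => s ++ [f j]) acc = acc ++ l.map f := by
  intro l
  induction l with
  | nil => simp
  | cons c t ih => intro acc; simp [ih]

lemma pv_map_range'_drop (cs : List Char) (i : ℕ) (h : i ≤ cs.length) :
    (List.range' i (cs.length - i)).map (fun j => cs.getD j ' ') = cs.drop i := by
  apply List.ext_getElem
  · simp
  · intro t h1 h2
    simp only [List.getElem_map, List.getElem_range', List.getElem_drop, Nat.one_mul]
    have ht : i + t < cs.length := by
      simp at h1; omega
    rw [List.getD_eq_getElem _ _ ht]

-- the reversed-order suffix list B's fold accumulates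
def pvRsuff : List Char → List Char → List (List Char)
  | [], _ => []
  | c :: t, acc => (c :: acc) :: pvRsuff t (c :: acc)

lemma pv_foldl_rsuff :
    ∀ (l : List Char) (acc : List Char) (res : List (List Char)),
      (l.foldl (fun (s : List Char × List (List Char)) ch => (ch :: s.1, s.2 ++ [ch :: s.1])) (acc, res)).2
        = res ++ pvRsuff l acc := by
  intro l
  induction l with
  | nil => simp [pvRsuff]
  | cons c t ih => intro acc res; simp [pvRsuff, ih]

lemma pv_rsuff_eq :
    ∀ (l : List Char) (acc : List Char),
      pvRsuff l acc = (List.range l.length).map (fun k => (l.take (k + 1)).reverse ++ acc) := by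
  intro l
  induction l with
  | nil => simp [pvRsuff]
  | cons c t ih =>
      intro acc
      simp only [pvRsuff, ih, List.length_cons, List.range_succ_eq_map, List.map_cons,
        List.map_map]
      simp

-- ===== VERDICT (by name: the statement is the Claim_ definition above) =====
theorem obtener_sufijos_spec : Claim_equal_obtener_sufijos := by
  unfold Claim_equal_obtener_sufijos Spec_obtener_sufijos
  intro palabra _
  unfold obtener_sufijos obtener_sufijos_alt
  simp only []
  set cs := palabra.toList with hcs
  rw [pv_foldl_app, pv_foldl_rsuff, pv_rsuff_eq]
  simp only [List.nil_append, List.length_reverse]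
  have hA : (List.range cs.length).map
      (fun i => String.mk ((List.range' i (cs.length - i)).foldl (fun sufijo j => sufijo ++ [cs.getD j ' ']) []))
      = (List.range cs.length).map (fun i => String.mk (cs.drop i)) := by
    apply List.map_congr_left
    intro i hi
    rw [pv_foldl_app, List.nil_append, pv_map_range'_drop]
    exact Nat.le_of_lt (List.mem_range.mp hi)
  rw [hA]
  apply List.ext_getElem
  · simp
  · intro j h1 h2
    have hj : j < cs.length := by simpa using h1
    simp only [List.getElem_map, List.getElem_reverse, List.getElem_range, List.length_map,
      List.length_range, List.append_nil]
    congr 1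
    have h1' : cs.length - 1 - j + 1 = cs.length - j := by omega
    rw [h1', List.take_reverse, List.reverse_reverse]
    congr 1
    omega
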